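-- pv_equiv track=rewrite | github.com/ishirgarg/adversarial_memory | playground/long_hop/analyze_errors.py | collapse_error_type
-- ===== SOURCE A (Python) =====
-- ERROR_TYPE_PRIORITY = ["not_stored", "summary_error", "not_retrieved"]
--
-- def collapse_error_type(per_fact_results: list, correctly_invoked) -> str:
--     categories = {f.get("category") for f in per_fact_results}
--     for p in ERROR_TYPE_PRIORITY:
--         if p in categories:
--             return p
--     if correctly_invoked is False:
--         return "reasoning_error"
--     return "correct"
-- ===== SOURCE B (Python) =====
-- ERROR_TYPE_PRIORITY = ["not_stored", "summary_error", "not_retrieved"]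
-- _RANK = {c: i for i, c in enumerate(ERROR_TYPE_PRIORITY)}
--
-- def collapse_error_type(per_fact_results: list, correctly_invoked) -> str:
--     best = None
--     for f in per_fact_results:
--         r = _RANK.get(f.get("category"))
--         if r is not None and (best is None or r < best):
--             best = r
--     if best is not None:
--         return ERROR_TYPE_PRIORITY[best]
--     if correctly_invoked is False:
--         return "reasoning_error"
--     return "correct"
-- ===== Notes on version B (the rewrite author's own statement) =====
-- stated objective: alternative
-- what changed: Replaces A's build-a-category-set-then-probe-3-priorities decomposition by a single argmin pass that keeps the minimum priority rank seen and indexes the priority list once at the end.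
import Mathlib
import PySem

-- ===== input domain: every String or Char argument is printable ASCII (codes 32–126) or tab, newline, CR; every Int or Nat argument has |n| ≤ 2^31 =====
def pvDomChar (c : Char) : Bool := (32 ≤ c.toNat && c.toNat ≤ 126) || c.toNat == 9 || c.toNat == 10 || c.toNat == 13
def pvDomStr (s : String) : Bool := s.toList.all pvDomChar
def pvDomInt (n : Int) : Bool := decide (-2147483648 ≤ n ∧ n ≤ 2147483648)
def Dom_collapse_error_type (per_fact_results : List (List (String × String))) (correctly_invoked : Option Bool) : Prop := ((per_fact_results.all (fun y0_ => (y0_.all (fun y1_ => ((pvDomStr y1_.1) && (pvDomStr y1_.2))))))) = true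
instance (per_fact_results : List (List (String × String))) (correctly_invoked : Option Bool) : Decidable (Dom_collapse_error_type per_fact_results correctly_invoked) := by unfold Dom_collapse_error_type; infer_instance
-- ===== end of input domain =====

-- B replaces A's "build the category set, then probe the 3 priorities in order" by a single
-- argmin pass keeping the minimum priority rank seen (objective: alternative decomposition).

-- ERROR_TYPE_PRIORITY, a module constant shared by both versions
def ERROR_TYPE_PRIORITY : List String := ["not_stored", "summary_error", "not_retrieved"]

-- ===== PORT A =====
-- f.get("category"): each fact is a dict ported as an assoc list; .get = first match (List.lookup)
def collapse_error_type (per_fact_results : List (List (String × String))) (correctly_invoked : Option Bool) : String :=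
  -- categories = {f.get("category") for f in per_fact_results}; for p in ERROR_TYPE_PRIORITY: if p in categories: return p
  match ERROR_TYPE_PRIORITY.find? (fun p =>
      PySem.Set.contains (PySem.Set.ofList (per_fact_results.map (fun f => f.lookup "category"))) (some p)) with
  | some p => p
  | none =>
    if correctly_invoked = some false then "reasoning_error" else "correct"

-- ===== PORT B =====
-- _RANK = {c: i for i, c in enumerate(ERROR_TYPE_PRIORITY)} (looked up with the Optional category)
def pvRANK : List (Option String × Nat) :=
  [(some "not_stored", 0), (some "summary_error", 1), (some "not_retrieved", 2)]

-- loop body: r = _RANK.get(f.get("category")); if r is not None and (best is None or r < best): best = r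
def pvStep (best : Option Nat) (f : List (String × String)) : Option Nat :=
  match pvRANK.lookup (f.lookup "category") with
  | none => best
  | some r =>
    match best with
    | none => some r
    | some b => if r < b then some r else some b

def collapse_error_type_alt (per_fact_results : List (List (String × String))) (correctly_invoked : Option Bool) : String :=
  match per_fact_results.foldl pvStep none with
  | some r => ERROR_TYPE_PRIORITY.getD r "correct"   -- ERROR_TYPE_PRIORITY[best]; r ∈ {0,1,2} always
  | none =>
    if correctly_invoked = some false then "reasoning_error" else "correct"

-- ===== PRECONDITION & SPEC =====
def Spec_collapse_error_type (per_fact_results : List (List (String × String))) (correctly_invoked : Option Bool) (out : String) : Prop := out = collapse_error_type_alt per_fact_results correctly_invoked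
instance (per_fact_results : List (List (String × String))) (correctly_invoked : Option Bool) (out : String) : Decidable (Spec_collapse_error_type per_fact_results correctly_invoked out) := by unfold Spec_collapse_error_type; infer_instance

-- ===== CLAIM (what is proved, stated in full; the proofs are below) =====
def Claim_equal_collapse_error_type : Prop := ∀ (per_fact_results : List (List (String × String))) (correctly_invoked : Option Bool), Dom_collapse_error_type per_fact_results correctly_invoked → Spec_collapse_error_type per_fact_results correctly_invoked (collapse_error_type per_fact_results correctly_invoked)

-- ===== LEMMAS AND PROOFS =====

-- the minimum of two optional ranks (none = no rank yet)
def omin : Option Nat → Option Nat → Option Nat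
  | none, b => b
  | some a, none => some a
  | some a, some b => some (min a b)

-- specification of B's fold: the minimum rank of a category present in cs
def bestSpec (cs : List (Option String)) : Option Nat :=
  if some "not_stored" ∈ cs then some 0
  else if some "summary_error" ∈ cs then some 1
  else if some "not_retrieved" ∈ cs then some 2
  else none

lemma pvStep_eq_omin (best : Option Nat) (f : List (String × String)) :
    pvStep best f = omin (pvRANK.lookup (f.lookup "category")) best := by
  unfold pvStep omin
  cases pvRANK.lookup (f.lookup "category") with
  | none => cases best <;> rfl
  | some r =>
    cases best with
    | none => rfl
    | some b =>
      show (if r < b then some r else some b) = some (min r b)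
      split_ifs with h
      · rw [Nat.min_eq_left h.le]
      · rw [Nat.min_eq_right (Nat.le_of_not_lt h)]

lemma omin_assoc (a b c : Option Nat) : omin (omin a b) c = omin a (omin b c) := by
  cases a <;> cases b <;> cases c <;> simp [omin, Nat.min_assoc]

lemma omin_comm (a b : Option Nat) : omin a b = omin b a := by
  cases a <;> cases b <;> simp [omin, Nat.min_comm]

lemma lookup_pvRANK_eq_none (c : Option String) (h0 : c ≠ some "not_stored")
    (h1 : c ≠ some "summary_error") (h2 : c ≠ some "not_retrieved") :
    pvRANK.lookup c = none := by
  unfold pvRANK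
  simp only [List.lookup]
  rw [beq_false_of_ne h0, beq_false_of_ne h1, beq_false_of_ne h2]

lemma bestSpec_cons (c : Option String) (cs : List (Option String)) :
    bestSpec (c :: cs) = omin (pvRANK.lookup c) (bestSpec cs) := by
  by_cases g0 : c = some "not_stored"
  · subst g0
    by_cases h0 : some "not_stored" ∈ cs <;>
    by_cases h1 : some "summary_error" ∈ cs <;>
    by_cases h2 : some "not_retrieved" ∈ cs <;>
    (simp [bestSpec, omin, h0, h1, h2, pvRANK]; try decide)
  · by_cases g1 : c = some "summary_error"
    · subst g1
      by_cases h0 : some "not_stored" ∈ cs <;>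
      by_cases h1 : some "summary_error" ∈ cs <;>
      by_cases h2 : some "not_retrieved" ∈ cs <;>
      (simp [bestSpec, omin, h0, h1, h2, pvRANK]; try decide)
    · by_cases g2 : c = some "not_retrieved"
      · subst g2
        by_cases h0 : some "not_stored" ∈ cs <;>
        by_cases h1 : some "summary_error" ∈ cs <;>
        by_cases h2 : some "not_retrieved" ∈ cs <;>
        (simp [bestSpec, omin, h0, h1, h2, pvRANK]; try decide)
      · rw [lookup_pvRANK_eq_none c g0 g1 g2]
        have m0 : (some "not_stored" ∈ c :: cs) ↔ (some "not_stored" ∈ cs) := by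
          simp only [List.mem_cons, or_iff_right_iff_imp]
          intro h; exact absurd h.symm g0
        have m1 : (some "summary_error" ∈ c :: cs) ↔ (some "summary_error" ∈ cs) := by
          simp only [List.mem_cons, or_iff_right_iff_imp]
          intro h; exact absurd h.symm g1
        have m2 : (some "not_retrieved" ∈ c :: cs) ↔ (some "not_retrieved" ∈ cs) := by
          simp only [List.mem_cons, or_iff_right_iff_imp]
          intro h; exact absurd h.symm g2
        unfold bestSpec
        simp only [m0, m1, m2, omin]

lemma foldl_pvStep (pfr : List (List (String × String))) (acc : Option Nat) :
    pfr.foldl pvStep acc = omin (bestSpec (pfr.map (fun f => f.lookup "category"))) acc := by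
  induction pfr generalizing acc with
  | nil => cases acc <;> rfl
  | cons f fs ih =>
    simp only [List.foldl_cons, List.map_cons]
    rw [ih, pvStep_eq_omin, bestSpec_cons]
    rw [← omin_assoc]
    exact congrArg (fun x => omin x acc) (omin_comm _ _)

lemma find?_priority (cats : List (Option String)) :
    ERROR_TYPE_PRIORITY.find? (fun p => PySem.Set.contains (PySem.Set.ofList cats) (some p)) =
    (bestSpec cats).map (fun r => ERROR_TYPE_PRIORITY.getD r "correct") := by
  have hmem : ∀ p : String, PySem.Set.contains (PySem.Set.ofList cats) (some p) = decide (some p ∈ cats) := by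
    intro p
    rcases h : PySem.Set.contains (PySem.Set.ofList cats) (some p) with _ | _
    · have : ¬ some p ∈ cats := by
        intro hm
        have := (PySem.Set.contains_iff (PySem.Set.ofList cats) (some p)).2
          ((PySem.Set.mem_ofList cats (some p)).2 hm)
        rw [h] at this; exact Bool.false_ne_true this
      simp [this]
    · have := (PySem.Set.mem_ofList cats (some p)).1
        ((PySem.Set.contains_iff (PySem.Set.ofList cats) (some p)).1 h)
      simp [this]
  unfold ERROR_TYPE_PRIORITY bestSpec
  simp only [List.find?, hmem]
  by_cases h0 : some "not_stored" ∈ cats <;>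
  by_cases h1 : some "summary_error" ∈ cats <;>
  by_cases h2 : some "not_retrieved" ∈ cats <;>
  simp [h0, h1, h2]

-- ===== VERDICT (by name: the statement is the Claim_ definition above) =====
theorem collapse_error_type_spec : Claim_equal_collapse_error_type := by
  intro pfr ci _
  unfold Spec_collapse_error_type collapse_error_type collapse_error_type_alt
  rw [foldl_pvStep, find?_priority]
  cases bestSpec (pfr.map (fun f => f.lookup "category")) with
  | none => rfl
  | some r => rfl
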